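-- pv_equiv track=rewrite | github.com/sanuwar/AssortDesign | app/tools.py | _find_focus
-- ===== SOURCE A (Python) =====
-- def _find_focus(sentence: str, claim_tokens: set[str]) -> int:
--     lower = sentence.lower()
--     indices = []
--     for token in claim_tokens:
--         if not token:
--             continue
--         idx = lower.find(token)
--         if idx != -1:
--             indices.append(idx)
--     if indices:
--         return min(indices)
--     return max(0, len(sentence) // 2)
-- ===== SOURCE B (Python) =====
-- def _find_focus(sentence: str, claim_tokens: set[str]) -> int:
--     lower = sentence.lower()
--     tokens = [t for t in claim_tokens if t]
--     for i in range(len(lower)):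
--         if any(lower.startswith(t, i) for t in tokens):
--             return i
--     return len(sentence) // 2
-- ===== Notes on version B (the rewrite author's own statement) =====
-- stated objective: faster
-- what changed: Instead of running .find over the whole sentence for every token and taking the min of the collected indices, B scans sentence positions left to right once and returns the first position at which any non-empty token starts, so it stops at the earliest match instead of always scanning everything.
import Mathlib
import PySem

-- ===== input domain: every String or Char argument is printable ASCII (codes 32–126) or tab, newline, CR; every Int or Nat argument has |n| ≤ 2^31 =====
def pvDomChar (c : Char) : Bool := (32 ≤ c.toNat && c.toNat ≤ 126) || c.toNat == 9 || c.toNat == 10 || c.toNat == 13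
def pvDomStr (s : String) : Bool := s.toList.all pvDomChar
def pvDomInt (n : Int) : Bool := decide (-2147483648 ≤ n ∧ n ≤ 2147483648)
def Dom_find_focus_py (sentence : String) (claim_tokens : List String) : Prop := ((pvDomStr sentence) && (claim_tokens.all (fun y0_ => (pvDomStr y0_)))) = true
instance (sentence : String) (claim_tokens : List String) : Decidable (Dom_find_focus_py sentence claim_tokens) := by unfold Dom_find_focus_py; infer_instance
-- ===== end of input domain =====

-- B replaces A's per-token find/min collection by a single left-to-right scan of the
-- sentence positions that returns the first position where any non-empty token starts
-- (objective: alternative algorithm, same result).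

-- ===== PORT A =====
def find_focus_py (sentence : String) (claim_tokens : List String) : Int :=
  let lower := PySem.Str.lower sentence
  let indices : List Int := claim_tokens.foldl (fun acc token =>
    if token = "" then acc
    else
      let idx := PySem.Str.find lower token
      if idx ≠ -1 then acc ++ [idx] else acc) []
  match PySem.List.min? indices (fun x => x) with
  | some m => m
  | none => max 0 (PySem.Int.floordiv (PySem.Str.len sentence) 2)

-- ===== PORT B =====
-- Source B's loop `for i in range(len(lower)): if any(lower.startswith(t, i) …): return i`:
-- for 0 ≤ i ≤ len(lower), Python's lower.startswith(t, i) is exactly "t is a prefix of the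
-- i-th suffix of lower", so the loop is ported as a structural walk over the suffixes
-- (exact on every input; ported by hand since PySem.startswith has no start argument).
def pvAltScan (tokens : List (List Char)) : List Char → Option Nat
  | [] => none
  | c :: rest =>
      if tokens.any (fun t => t.isPrefixOf (c :: rest)) then some 0
      else (pvAltScan tokens rest).map (· + 1)

def find_focus_py_alt (sentence : String) (claim_tokens : List String) : Int :=
  let lower := PySem.Chars.lower sentence.toList
  let tokens := (claim_tokens.map String.toList).filter (fun t => t ≠ [])
  match pvAltScan tokens lower with
  | some i => (i : Int)
  | none => PySem.Int.floordiv (PySem.Str.len sentence) 2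

-- ===== PRECONDITION & SPEC =====
def Spec_find_focus_py (sentence : String) (claim_tokens : List String) (out : Int) : Prop := out = find_focus_py_alt sentence claim_tokens
instance (sentence : String) (claim_tokens : List String) (out : Int) : Decidable (Spec_find_focus_py sentence claim_tokens out) := by unfold Spec_find_focus_py; infer_instance

-- ===== CLAIM (what is proved, stated in full; the proofs are below) =====
def Claim_equal_find_focus_py : Prop := ∀ (sentence : String) (claim_tokens : List String), Dom_find_focus_py sentence claim_tokens → Spec_find_focus_py sentence claim_tokens (find_focus_py sentence claim_tokens)

-- ===== LEMMAS AND PROOFS =====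

-- the scan finds nothing iff no (non-empty) token occurs in the text at all
lemma pvAltScan_eq_none_iff (tokens : List (List Char)) (l : List Char)
    (h : ∀ t ∈ tokens, t ≠ []) :
    pvAltScan tokens l = none ↔ ∀ t ∈ tokens, ¬ t <:+: l := by
  induction l with
  | nil =>
      simp only [pvAltScan, true_iff]
      intro t ht hinf
      exact h t ht ((List.infix_nil).mp hinf)
  | cons c rest ih =>
      by_cases hany : tokens.any (fun t => t.isPrefixOf (c :: rest)) = true
      · simp [pvAltScan, hany]
        rcases List.any_eq_true.mp hany with ⟨t, ht, hp⟩
        exact ⟨t, ht, (List.isPrefixOf_iff_prefix.mp hp).isInfix⟩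
      · rw [show pvAltScan tokens (c :: rest) = (pvAltScan tokens rest).map (· + 1) from by
          simp [pvAltScan, hany]]
        rw [Option.map_eq_none_iff, ih]
        constructor
        · intro hn t ht hinf
          rcases List.infix_cons_iff.mp hinf with hp | hi
          · exact hany (List.any_eq_true.mpr ⟨t, ht, List.isPrefixOf_iff_prefix.mpr hp⟩)
          · exact hn t ht hi
        · intro hn t ht hinf
          exact hn t ht (hinf.trans (List.suffix_cons c rest).isInfix)

-- the scan returns the FIRST position at which some token starts
lemma pvAltScan_eq_some (tokens : List (List Char)) (l : List Char) (n : Nat)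
    (h : pvAltScan tokens l = some n) :
    (∃ t ∈ tokens, t <+: l.drop n) ∧ ∀ m < n, ¬ ∃ t ∈ tokens, t <+: l.drop m := by
  induction l generalizing n with
  | nil => simp [pvAltScan] at h
  | cons c rest ih =>
      by_cases hany : tokens.any (fun t => t.isPrefixOf (c :: rest)) = true
      · simp only [pvAltScan, hany, if_true, Option.some.injEq] at h
        subst h
        rcases List.any_eq_true.mp hany with ⟨t, ht, hp⟩
        exact ⟨⟨t, ht, by simpa using List.isPrefixOf_iff_prefix.mp hp⟩, by omega⟩
      · rw [show pvAltScan tokens (c :: rest) = (pvAltScan tokens rest).map (· + 1) from by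
          simp [pvAltScan, hany], Option.map_eq_some_iff] at h
        rcases h with ⟨k, hk, rfl⟩
        rcases ih k hk with ⟨h1, h2⟩
        refine ⟨by simpa using h1, ?_⟩
        rintro m hm ⟨t, ht, hp⟩
        match m with
        | 0 =>
            exact hany (List.any_eq_true.mpr ⟨t, ht, List.isPrefixOf_iff_prefix.mpr (by simpa using hp)⟩)
        | m + 1 =>
            exact h2 m (by omega) ⟨t, ht, by simpa using hp⟩

-- A's append-collecting loop in closed form (cited shape: PySem.List.foldl_append_if)
lemma pvIndicesA (lower : String) (l : List String) :
    l.foldl (fun acc token =>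
      if token = "" then acc
      else
        let idx := PySem.Str.find lower token
        if idx ≠ -1 then acc ++ [idx] else acc) ([] : List Int)
    = (l.filter (fun t => !(t == "") && (PySem.Str.find lower t != -1))).map
        (fun t => PySem.Str.find lower t) := by
  have hfun : (fun (acc : List Int) (token : String) =>
      if token = "" then acc
      else
        let idx := PySem.Str.find lower token
        if idx ≠ -1 then acc ++ [idx] else acc)
    = (fun acc token =>
        if (!(token == "") && (PySem.Str.find lower token != -1)) = true
        then acc ++ [PySem.Str.find lower token] else acc) := by
    funext acc token
    by_cases h1 : token = ""
    · simp [h1]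
    · by_cases h2 : PySem.Chars.find lower.toList token.toList = -1 <;> simp [h1, h2]
  rw [hfun]
  simpa using PySem.List.foldl_append_if
    (fun t => !(t == "") && (PySem.Str.find lower t != -1))
    (fun t => PySem.Str.find lower t) l []

lemma pvStr_eq_empty_iff (t : String) : t = "" ↔ t.toList = [] := by
  rw [String.ext_iff]; simp only [String.toList_empty]

-- ===== VERDICT (by name: the statement is the Claim_ definition above) =====
theorem find_focus_py_spec : Claim_equal_find_focus_py := by
  intro sentence claim_tokens _
  unfold Spec_find_focus_py find_focus_py find_focus_py_alt
  simp only [pvIndicesA]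
  set s : List Char := PySem.Chars.lower sentence.toList with hs
  have hfind : ∀ t : String,
      PySem.Str.find (PySem.Str.lower sentence) t = PySem.Chars.find s t.toList := by
    intro t
    rw [PySem.Str.find_eq, PySem.Str.toList_lower]
  set toks : List (List Char) :=
    (claim_tokens.map String.toList).filter (fun t => t ≠ []) with htoks
  have htoks_mem : ∀ u : List Char,
      u ∈ toks ↔ (u ≠ [] ∧ ∃ x ∈ claim_tokens, x.toList = u) := by
    intro u
    simp [htoks, List.mem_filter, List.mem_map, and_comm]
  have htoks_ne : ∀ u ∈ toks, u ≠ [] := fun u hu => ((htoks_mem u).mp hu).1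
  have hfilter_mem : ∀ x : String,
      x ∈ claim_tokens.filter
          (fun t => !(t == "") && (PySem.Str.find (PySem.Str.lower sentence) t != -1))
      ↔ (x ∈ claim_tokens ∧ x.toList ≠ [] ∧ PySem.Chars.find s x.toList ≠ -1) := by
    intro x
    rw [List.mem_filter]
    simp only [Bool.and_eq_true, Bool.not_eq_true', beq_eq_false_iff_ne, bne_iff_ne]
    constructor
    · rintro ⟨hx, hp1, hp2⟩
      exact ⟨hx, fun h => hp1 ((pvStr_eq_empty_iff x).mpr h), by rw [← hfind x]; exact hp2⟩
    · rintro ⟨hx, hne, hfd⟩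
      exact ⟨hx, fun h => hne ((pvStr_eq_empty_iff x).mp h), by rw [hfind x]; exact hfd⟩
  have hfallback : max 0 (PySem.Int.floordiv (PySem.Str.len sentence) 2)
      = PySem.Int.floordiv (PySem.Str.len sentence) 2 := by
    rw [PySem.Int.floordiv_eq_ediv_of_pos (by norm_num), PySem.Str.len_eq]
    have : (0:Int) ≤ (sentence.toList.length : Int) / 2 := by positivity
    omega
  by_cases hex : ∃ x ∈ claim_tokens, x.toList ≠ [] ∧ x.toList <:+: s
  · -- some token occurs: both sides return the first occurrence position
    obtain ⟨u0, hu0, hne0, hinf0⟩ := hex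
    have hu0f : u0 ∈ claim_tokens.filter
        (fun t => !(t == "") && (PySem.Str.find (PySem.Str.lower sentence) t != -1)) :=
      (hfilter_mem u0).mpr ⟨hu0, hne0, (PySem.Chars.find_ne_neg_one_iff s u0.toList).mpr hinf0⟩
    have hu0t : u0.toList ∈ toks := (htoks_mem u0.toList).mpr ⟨hne0, u0, hu0, rfl⟩
    -- A's min exists
    cases hmin : PySem.List.min?
        ((claim_tokens.filter
            (fun t => !(t == "") && (PySem.Str.find (PySem.Str.lower sentence) t != -1))).map
          (fun t => PySem.Str.find (PySem.Str.lower sentence) t)) (fun x => x) with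
    | none =>
        rw [PySem.List.min?_eq_none_iff, List.map_eq_nil_iff] at hmin
        rw [hmin] at hu0f
        simp at hu0f
    | some m =>
        -- B's scan finds something
        cases hscan : pvAltScan toks s with
        | none =>
            exact absurd hinf0
              (((pvAltScan_eq_none_iff toks s htoks_ne).mp hscan) u0.toList hu0t)
        | some k =>
            obtain ⟨⟨t1, ht1, hp1⟩, hminB⟩ := pvAltScan_eq_some toks s k hscan
            -- m is the find-index of some accepted token t0
            obtain ⟨t0, ht0f, hm⟩ := List.mem_map.mp (PySem.List.min?_mem hmin)
            obtain ⟨ht0mem, ht0ne, ht0find⟩ := (hfilter_mem t0).mp ht0f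
            rw [hfind t0] at hm
            have hm0 : (0:Int) ≤ m := by
              rw [← hm]
              exact (PySem.Chars.find_nonneg_iff s t0.toList).mpr
                ((PySem.Chars.find_ne_neg_one_iff s t0.toList).mp ht0find)
            have hspec0 := PySem.Chars.find_spec (sub := t0.toList) (by rw [hm]; exact hm0)
            rw [hm] at hspec0
            -- k is not below m.toNat
            have hk1 : ¬ k < m.toNat := by
              intro hlt
              obtain ⟨hne1, x1, hx1, hx1t⟩ := (htoks_mem t1).mp ht1
              have hinf1 : t1 <:+: s := hp1.isInfix.trans (List.drop_suffix k s).isInfix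
              have hx1find : PySem.Chars.find s t1 ≠ -1 :=
                (PySem.Chars.find_ne_neg_one_iff s t1).mpr hinf1
              have hx1f : x1 ∈ claim_tokens.filter
                  (fun t => !(t == "") && (PySem.Str.find (PySem.Str.lower sentence) t != -1)) :=
                (hfilter_mem x1).mpr ⟨hx1, by rw [hx1t]; exact hne1, by rw [hx1t]; exact hx1find⟩
              have hle : m ≤ PySem.Chars.find s t1 := by
                have := PySem.List.min?_isMin hmin
                  (PySem.Str.find (PySem.Str.lower sentence) x1)
                  (List.mem_map.mpr ⟨x1, hx1f, rfl⟩)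
                rwa [hfind x1, hx1t] at this
              have hspec1 := PySem.Chars.find_spec (sub := t1)
                ((PySem.Chars.find_nonneg_iff s t1).mpr hinf1)
              exact hspec1.2 k (by omega) hp1
            -- k is not above m.toNat either
            have hk2 : ¬ m.toNat < k := by
              intro hlt
              exact hminB m.toNat hlt ⟨t0.toList,
                (htoks_mem t0.toList).mpr ⟨ht0ne, t0, ht0mem, rfl⟩, hspec0.1⟩
            have : k = m.toNat := by omega
            subst this
            simpa using (Int.toNat_of_nonneg hm0).symm
  · -- no token occurs: both sides fall back to the midpoint
    push Not at hex
    have hfe : claim_tokens.filter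
        (fun t => !(t == "") && (PySem.Str.find (PySem.Str.lower sentence) t != -1)) = [] := by
      rw [List.filter_eq_nil_iff]
      intro x hx hpx
      obtain ⟨_, hne, hfd⟩ := (hfilter_mem x).mp (List.mem_filter.mpr ⟨hx, hpx⟩)
      exact hfd ((PySem.Chars.find_eq_neg_one_iff s x.toList).mpr (hex x hx hne))
    have hscan : pvAltScan toks s = none := by
      rw [pvAltScan_eq_none_iff toks s htoks_ne]
      intro t ht
      obtain ⟨hne, x, hx, hxt⟩ := (htoks_mem t).mp ht
      rw [← hxt]
      exact hex x hx (by rw [hxt]; exact hne)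
    rw [hfe, List.map_nil,
      (PySem.List.min?_eq_none_iff ([] : List Int) (fun x => x)).mpr rfl, hscan]
    simpa using hfallback
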